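-- pv_equiv track=rewrite | github.com/saint2706/Pro-g-rammingChallenges4 | Practical/IP Tracking visualization/streamlit_app.py | _parse_ip_lines
-- ===== SOURCE A (Python) =====
-- from typing import Iterable, List, Sequence
--
-- def _parse_ip_lines(lines: Iterable[str]) -> List[str]:
--     """Parse an iterable of strings into a list of unique, trimmed IPs."""
--
--     cleaned: List[str] = []
--     for raw in lines:
--         # Split on whitespace and commas to accommodate a variety of inputs.
--         for token in raw.replace(",", " ").split():
--             ip = token.strip()
--             if ip and ip not in cleaned:
--                 cleaned.append(ip)
--     return cleaned
-- ===== SOURCE B (Python) =====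
-- from typing import Iterable, List
--
-- def _parse_ip_lines(lines: Iterable[str]) -> List[str]:
--     """Parse an iterable of strings into a list of unique, trimmed IPs.
--
--     Character-level scanner: build each token one character at a time,
--     treating commas and whitespace as separators, and emit a token the
--     moment it closes if it has not been seen before (O(1) set lookup).
--     A trailing sentinel space flushes the last token of each line.
--     """
--     seen = set()
--     out: List[str] = []
--     for raw in lines:
--         cur: List[str] = []
--         for ch in raw + " ":
--             if ch == "," or ch.isspace():
--                 if cur:
--                     tok = "".join(cur)
--                     if tok not in seen:
--                         seen.add(tok)
--                         out.append(tok)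
--                     cur = []
--             else:
--                 cur.append(ch)
--     return out
-- ===== Notes on version B (the rewrite author's own statement) =====
-- stated objective: alternative
-- what changed: Replaces A's replace/split/strip pipeline with its linear 'ip not in cleaned' scan by a single character-level scanner that builds each token in a buffer, closing it at a comma/whitespace separator and emitting it through an O(1) seen-set.
import Mathlib
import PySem

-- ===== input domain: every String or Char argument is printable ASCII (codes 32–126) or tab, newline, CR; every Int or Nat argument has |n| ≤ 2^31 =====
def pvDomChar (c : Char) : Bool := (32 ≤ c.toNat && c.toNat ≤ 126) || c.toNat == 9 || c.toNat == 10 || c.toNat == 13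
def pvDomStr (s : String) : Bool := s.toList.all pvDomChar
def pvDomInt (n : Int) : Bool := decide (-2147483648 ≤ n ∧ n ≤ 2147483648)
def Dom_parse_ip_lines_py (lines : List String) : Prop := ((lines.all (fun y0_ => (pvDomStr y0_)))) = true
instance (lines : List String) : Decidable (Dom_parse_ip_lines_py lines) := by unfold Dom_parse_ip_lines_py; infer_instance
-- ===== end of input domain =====

-- B replaces A's replace/split/strip pipeline with its linear 'not in cleaned' scan by a
-- character-level scanner with a token buffer and a seen-set; alternative decomposition, same results.

-- ===== PORT A =====
def parse_ip_lines_py (lines : List String) : List String :=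
  lines.foldl (fun cleaned raw =>
    (PySem.Str.split₀ (PySem.Str.replace raw "," " ")).foldl
      (fun cleaned token =>
        let ip := PySem.Str.strip token
        if ip ≠ "" ∧ ip ∉ cleaned then cleaned ++ [ip] else cleaned)
      cleaned) []

-- ===== PORT B =====
-- one character of B's scan: state = ((seen, out), cur)
def pvStep (st : (PySem.Set String × List String) × List Char) (ch : Char) :
    (PySem.Set String × List String) × List Char :=
  if ch = ',' ∨ PySem.Chars.isspace ch = true then
    if st.2.isEmpty then (st.1, [])
    else
      let tok := String.ofList st.2
      if PySem.Set.contains st.1.1 tok then (st.1, [])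
      else ((PySem.Set.add st.1.1 tok, st.1.2 ++ [tok]), [])
  else (st.1, st.2 ++ [ch])

def parse_ip_lines_py_alt (lines : List String) : List String :=
  (lines.foldl
    (fun so raw => ((raw.toList ++ [' ']).foldl pvStep (so, ([] : List Char))).1)
    (([] : PySem.Set String), ([] : List String))).2

-- ===== PRECONDITION & SPEC =====
def Spec_parse_ip_lines_py (lines : List String) (out : List String) : Prop := out = parse_ip_lines_py_alt lines
instance (lines : List String) (out : List String) : Decidable (Spec_parse_ip_lines_py lines out) := by unfold Spec_parse_ip_lines_py; infer_instance

-- ===== CLAIM (what is proved, stated in full; the proofs are below) =====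
def Claim_equal_parse_ip_lines_py : Prop := ∀ (lines : List String), Dom_parse_ip_lines_py lines → Spec_parse_ip_lines_py lines (parse_ip_lines_py lines)

-- ===== LEMMAS AND PROOFS =====

-- separator predicate of B's scanner
def pvSep (c : Char) : Bool := decide (c = ',') || PySem.Chars.isspace c

-- effect of A's replace(",", " ") on one character
def pvRepl (c : Char) : Char := if c = ',' then ' ' else c

-- tokens of one line, in the order B's scanner closes them (cur = open token buffer)
def pvToks (cur : List Char) : List Char → List (List Char)
  | [] => if cur.isEmpty then [] else [cur]
  | c :: cs => if pvSep c then (if cur.isEmpty then pvToks [] cs else cur :: pvToks [] cs)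
               else pvToks (cur ++ [c]) cs

-- emitting one closed token
def pvEmit (st : PySem.Set String × List String) (tok : List Char) :
    PySem.Set String × List String :=
  if PySem.Set.contains st.1 (String.ofList tok) then st
  else (PySem.Set.add st.1 (String.ofList tok), st.2 ++ [String.ofList tok])

theorem pv_sep_iff (c : Char) : (c = ',' ∨ PySem.Chars.isspace c = true) ↔ pvSep c = true := by
  unfold pvSep
  simp

theorem pv_replace_go (fuel : Nat) (l acc : List Char) (h : l.length ≤ fuel) :
    PySem.Chars.replace.go [','] [' '] fuel l acc = acc.reverse ++ l.map pvRepl := by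
  induction fuel generalizing l acc with
  | zero =>
    have hl : l = [] := by cases l <;> simp_all
    subst hl
    simp [PySem.Chars.replace.go]
  | succ n ih =>
    cases l with
    | nil => simp [PySem.Chars.replace.go]
    | cons c t =>
      simp only [PySem.Chars.replace.go]
      by_cases hc : c = ','
      · subst hc
        have hp : List.isPrefixOf [','] (',' :: t) = true := by
          simp [List.isPrefixOf]
        rw [if_pos hp]
        have ht : t.length ≤ n := by simpa using h
        simp only [List.length_cons, List.length_nil, Nat.zero_add, List.drop_succ_cons,
          List.drop_zero, List.reverse_cons, List.reverse_nil, List.nil_append,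
          List.singleton_append]
        rw [ih t (' ' :: acc) ht]
        simp [pvRepl]
      · have hp : List.isPrefixOf [','] (c :: t) = false := by
          simp [List.isPrefixOf]
          exact fun h => hc h.symm
        rw [if_neg (by simp [hp])]
        have ht : t.length ≤ n := by simp at h; omega
        rw [ih t (c :: acc) ht]
        simp [pvRepl, hc]

theorem pv_replace_map (s : List Char) :
    PySem.Chars.replace s [','] [' '] = s.map pvRepl := by
  have := pv_replace_go s.length s [] le_rfl
  simpa [PySem.Chars.replace] using this

theorem pv_isspace_repl (c : Char) : PySem.Chars.isspace (pvRepl c) = pvSep c := by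
  unfold pvRepl pvSep
  by_cases hc : c = ','
  · subst hc; simp; decide
  · simp [hc]

theorem pv_go_toks (cs cur : List Char) (acc : List (List Char)) :
    PySem.Chars.split₀.go (cs.map pvRepl) cur.reverse acc = acc.reverse ++ pvToks cur cs := by
  induction cs generalizing cur acc with
  | nil =>
    simp only [List.map_nil, PySem.Chars.split₀.go, pvToks]
    by_cases hc : cur.isEmpty = true
    · simp [hc]
    · simp [hc]
  | cons c cs ih =>
    simp only [List.map_cons, PySem.Chars.split₀.go, pv_isspace_repl]
    by_cases hs : pvSep c = true
    · rw [if_pos hs]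
      by_cases hc : cur.isEmpty = true
      · have : cur = [] := by simpa [List.isEmpty_iff] using hc
        subst this
        simp only [List.reverse_nil, List.isEmpty_nil, if_pos]
        have := ih [] acc
        simpa [pvToks, hs, hc] using this
      · rw [if_neg (by simpa using hc)]
        have := ih [] (cur.reverse.reverse :: acc)
        simp only [List.reverse_nil] at this
        rw [this]
        simp [pvToks, hs, hc]
    · rw [if_neg (by simpa using hs)]
      have hcc : pvRepl c = c := by
        unfold pvSep at hs
        simp at hs
        simp [pvRepl, hs.1]
      rw [hcc]
      have := ih (cur ++ [c]) acc
      simp only [List.reverse_append, List.reverse_cons, List.reverse_nil,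
        List.nil_append, List.singleton_append] at this
      rw [this]
      simp [pvToks, hs]

theorem pv_scan (cs cur : List Char) (st : PySem.Set String × List String) :
    (cs ++ [' ']).foldl pvStep (st, cur) = ((pvToks cur cs).foldl pvEmit st, []) := by
  induction cs generalizing cur st with
  | nil =>
    have hss : PySem.Chars.isspace ' ' = true := by decide
    by_cases hc : cur.isEmpty = true
    · simp [pvStep, pvToks, hss, hc]
    · by_cases hm : String.ofList cur ∈ st.1
      · simp [pvStep, pvToks, pvEmit, hss, hc, hm]
      · simp [pvStep, pvToks, pvEmit, hss, hc, hm]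
  | cons c cs ih =>
    simp only [List.cons_append, List.foldl_cons]
    by_cases hs : pvSep c = true
    · have hsp : (c = ',' ∨ PySem.Chars.isspace c = true) := (pv_sep_iff c).mpr hs
      by_cases hc : cur.isEmpty = true
      · rw [show pvStep (st, cur) c = (st, []) by simp [pvStep, hsp, hc]]
        rw [ih [] st]
        simp [pvToks, hs, hc]
      · by_cases hm : String.ofList cur ∈ st.1
        · rw [show pvStep (st, cur) c = (st, []) by simp [pvStep, hsp, hc, hm]]
          rw [ih [] st]
          simp [pvToks, hs, hc, pvEmit, hm]
        · rw [show pvStep (st, cur) c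
               = ((PySem.Set.add st.1 (String.ofList cur), st.2 ++ [String.ofList cur]), []) by
              simp [pvStep, hsp, hc, hm]]
          rw [ih [] (PySem.Set.add st.1 (String.ofList cur), st.2 ++ [String.ofList cur])]
          simp [pvToks, hs, hc, pvEmit, hm]
    · have hsp : ¬ (c = ',' ∨ PySem.Chars.isspace c = true) := fun h => by
        simp [(pv_sep_iff c).mp h] at hs
      rw [show pvStep (st, cur) c = (st, cur ++ [c]) by simp [pvStep, hsp]]
      rw [ih (cur ++ [c]) st]
      simp [pvToks, hs]

theorem pv_toks_clean (cs cur : List Char) (hcur : ∀ c ∈ cur, pvSep c = false) :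
    ∀ t ∈ pvToks cur cs, t ≠ [] ∧ ∀ c ∈ t, pvSep c = false := by
  induction cs generalizing cur with
  | nil =>
    intro t ht
    simp only [pvToks] at ht
    by_cases hc : cur.isEmpty = true
    · simp [hc] at ht
    · simp only [if_neg hc, List.mem_singleton] at ht
      subst ht
      exact ⟨by simpa [List.isEmpty_iff] using hc, hcur⟩
  | cons c cs ih =>
    intro t ht
    simp only [pvToks] at ht
    by_cases hs : pvSep c = true
    · simp only [if_pos hs] at ht
      by_cases hc : cur.isEmpty = true
      · simp only [if_pos hc] at ht
        exact ih [] (by simp) t ht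
      · simp only [if_neg hc, List.mem_cons] at ht
        rcases ht with h | h
        · subst h
          exact ⟨by simpa [List.isEmpty_iff] using hc, hcur⟩
        · exact ih [] (by simp) t h
    · simp only [if_neg hs] at ht
      refine ih (cur ++ [c]) ?_ t ht
      intro d hd
      rcases List.mem_append.mp hd with h | h
      · exact hcur d h
      · simp only [List.mem_singleton] at h
        subst h
        simpa using hs

theorem pv_dropWhile_nospace (t : List Char) (h : ∀ c ∈ t, PySem.Chars.isspace c = false) :
    List.dropWhile PySem.Chars.isspace t = t := by
  cases t with
  | nil => simp
  | cons c ts => simp [List.dropWhile, h c (by simp)]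

theorem pv_strip_nosep (t : List Char) (h : ∀ c ∈ t, pvSep c = false) :
    PySem.Chars.strip t = t := by
  have hns : ∀ c ∈ t, PySem.Chars.isspace c = false := by
    intro c hc
    have := h c hc
    unfold pvSep at this
    simp at this
    exact this.2
  simp only [PySem.Chars.strip, PySem.Chars.lstrip, PySem.Chars.rstrip,
    pv_dropWhile_nospace t hns]
  rw [pv_dropWhile_nospace t.reverse (fun c hc => hns c (List.mem_reverse.mp hc)),
    List.reverse_reverse]

-- the invariant: seen and out hold the same strings
def pvInv (st : PySem.Set String × List String) : Prop := ∀ t, t ∈ st.1 ↔ t ∈ st.2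

theorem pv_emit_fold (toks : List (List Char)) (st : PySem.Set String × List String)
    (hst : pvInv st) :
    (toks.foldl pvEmit st).2
      = toks.foldl (fun c t => PySem.Set.add c (String.ofList t)) st.2
    ∧ pvInv (toks.foldl pvEmit st) := by
  induction toks generalizing st with
  | nil => exact ⟨rfl, hst⟩
  | cons t toks ih =>
    simp only [List.foldl_cons]
    by_cases hm : String.ofList t ∈ st.1
    · have hc : PySem.Set.contains st.1 (String.ofList t) = true := by
        simp [PySem.Set.contains, hm]
      have h2 : String.ofList t ∈ st.2 := (hst _).mp hm
      have hadd : PySem.Set.add st.2 (String.ofList t) = st.2 := by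
        simp [PySem.Set.add, PySem.Set.contains, h2]
      rw [show pvEmit st t = st by simp [pvEmit, hm], hadd]
      exact ih st hst
    · have hc : PySem.Set.contains st.1 (String.ofList t) = false := by
        simp [PySem.Set.contains, hm]
      have h2 : String.ofList t ∉ st.2 := fun h => hm ((hst _).mpr h)
      have hadd : PySem.Set.add st.2 (String.ofList t) = st.2 ++ [String.ofList t] := by
        simp [PySem.Set.add, PySem.Set.contains, h2]
      rw [show pvEmit st t
            = (PySem.Set.add st.1 (String.ofList t), st.2 ++ [String.ofList t]) by
          simp [pvEmit, hm], hadd]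
      refine ih _ ?_
      intro u
      rw [PySem.Set.mem_add]
      simp only [List.mem_append, List.mem_singleton]
      constructor
      · rintro (h | h)
        · exact Or.inl ((hst u).mp h)
        · exact Or.inr h
      · rintro (h | h)
        · exact Or.inl ((hst u).mpr h)
        · exact Or.inr h

-- A's inner loop over clean tokens is foldl Set.add over their strings
theorem pv_inner (g : List (List Char)) (cleaned : List String)
    (hg : ∀ t ∈ g, t ≠ [] ∧ ∀ c ∈ t, pvSep c = false) :
    (g.map String.ofList).foldl (fun cleaned token =>
        let ip := PySem.Str.strip token
        if ip ≠ "" ∧ ip ∉ cleaned then cleaned ++ [ip] else cleaned) cleaned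
      = g.foldl (fun c t => PySem.Set.add c (String.ofList t)) cleaned := by
  rw [List.foldl_map]
  apply PySem.List.foldl_congr_mem'
  intro t ht acc
  obtain ⟨hne, hclean⟩ := hg t ht
  have hs : PySem.Str.strip (String.ofList t) = String.ofList t := by
    have htl : (String.ofList t).toList = t := by simp
    simp only [PySem.Str.strip, htl, pv_strip_nosep t hclean]
  have hne' : String.ofList t ≠ "" := by
    intro h
    apply hne
    have : (String.ofList t).toList = ("" : String).toList := by rw [h]
    simpa using this
  simp only [hs, PySem.Set.add, PySem.Set.contains]
  by_cases hm : String.ofList t ∈ acc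
  · simp [hm]
  · simp [hm, hne']

-- A's per-line tokens are exactly B's scanner tokens
theorem pv_tokens_eq (raw : String) :
    PySem.Str.split₀ (PySem.Str.replace raw "," " ")
      = (pvToks [] raw.toList).map String.ofList := by
  have hc : ("," : String).toList = [','] := rfl
  have hs : (" " : String).toList = [' '] := rfl
  simp only [PySem.Str.split₀, PySem.Str.replace, hc, hs]
  have htl : (String.ofList (PySem.Chars.replace raw.toList [','] [' '])).toList
      = PySem.Chars.replace raw.toList [','] [' '] := by simp
  rw [htl, pv_replace_map, PySem.Chars.split₀]
  have := pv_go_toks raw.toList [] []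
  simp only [List.reverse_nil] at this
  rw [this]
  simp

theorem pv_main (lines : List String) (st : PySem.Set String × List String)
    (hst : pvInv st) :
    (lines.foldl (fun so raw => ((raw.toList ++ [' ']).foldl pvStep (so, ([] : List Char))).1) st).2
      = lines.foldl (fun cleaned raw =>
          (PySem.Str.split₀ (PySem.Str.replace raw "," " ")).foldl
            (fun cleaned token =>
              let ip := PySem.Str.strip token
              if ip ≠ "" ∧ ip ∉ cleaned then cleaned ++ [ip] else cleaned)
            cleaned) st.2
    ∧ pvInv (lines.foldl (fun so raw => ((raw.toList ++ [' ']).foldl pvStep (so, ([] : List Char))).1) st) := by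
  induction lines generalizing st with
  | nil => exact ⟨rfl, hst⟩
  | cons raw rest ih =>
    obtain ⟨hout, hinv⟩ := pv_emit_fold (pvToks [] raw.toList) st hst
    have hA : (PySem.Str.split₀ (PySem.Str.replace raw "," " ")).foldl
        (fun cleaned token =>
          let ip := PySem.Str.strip token
          if ip ≠ "" ∧ ip ∉ cleaned then cleaned ++ [ip] else cleaned) st.2
        = ((pvToks [] raw.toList).foldl pvEmit st).2 := by
      rw [pv_tokens_eq raw,
        pv_inner (pvToks [] raw.toList) st.2 (pv_toks_clean raw.toList [] (by simp)), hout]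
    rw [List.foldl_cons, List.foldl_cons, pv_scan raw.toList [] st,
      show ((pvToks [] raw.toList).foldl pvEmit st, ([] : List Char)).1
        = (pvToks [] raw.toList).foldl pvEmit st from rfl, hA]
    exact ⟨(ih _ hinv).1, (ih _ hinv).2⟩

-- ===== VERDICT (by name: the statement is the Claim_ definition above) =====
theorem parse_ip_lines_py_spec : Claim_equal_parse_ip_lines_py := by
  intro lines _
  unfold Spec_parse_ip_lines_py parse_ip_lines_py parse_ip_lines_py_alt
  exact ((pv_main lines ([], []) (by intro t; simp)).1).symm
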